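-- pv_equiv track=rewrite | github.com/Aida-adzd/Bizz | Ascent/Quacktine_CS50/Quacktine.py | count_walls
-- ===== SOURCE A (Python) =====
-- def count_walls(table: list):
--     # Get the dimensions of the table
--     counter = 0
--     n = len(table)
--     m = len(table[0])
--
--     '''
--         For each cell, the function checks the neighboring cells (top, bottom, left, and right) to determine whether the current cell should be spanned or not.
--         Considers table boundaries to handle edge cases properly.
--         For example, if it is the first row, there is no element above it to check, so up = table [i][j]
--         If it is the last row, there is no element below it to check, so down = table [i][j]
--         For each row, the first and last columns are also the same, and there are no elements on the left or right
--     '''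
--
--     for i in range(n):
--         for j in range(m):
--             if table[i][j] == 1:
--                 # Check left cell
--                 if j > 0 and table[i][j - 1] == 0:
--                     counter += 1
--                 # Check right cell
--                 if j < m - 1 and table[i][j + 1] == 0:
--                     counter += 1
--                 # Check bottom cell
--                 if i < n - 1 and table[i + 1][j] == 0:
--                     counter += 1
--                 # Check top cell
--                 if i > 0 and table[i - 1][j] == 0:
--                     counter += 1
--             '''
--             If the current cell is a wall (table[i][j] == 1), i.e. none of the adjacent cells is a wall (top, bottom, left, or right is 0), the number of walls is incremented accordingly.
--             '''
--
--     return counter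
-- ===== SOURCE B (Python) =====
-- def count_walls(table: list):
--     counter = 0
--     n = len(table)
--     m = len(table[0])
--     # horizontal neighbor pairs
--     for i in range(n):
--         for j in range(m - 1):
--             a = table[i][j]
--             b = table[i][j + 1]
--             if (a == 1 and b == 0) or (a == 0 and b == 1):
--                 counter += 1
--     # vertical neighbor pairs
--     for i in range(n - 1):
--         for j in range(m):
--             a = table[i][j]
--             b = table[i + 1][j]
--             if (a == 1 and b == 0) or (a == 0 and b == 1):
--                 counter += 1
--     return counter
-- ===== Notes on version B (the rewrite author's own statement) =====
-- stated objective: alternative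
-- what changed: Instead of scanning the four neighbors of every wall cell, B makes one pass over horizontal adjacent pairs and one over vertical adjacent pairs, counting each pair with exactly one 1 and one 0; each such pair accounts for exactly one wall/empty boundary.
import Mathlib
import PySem

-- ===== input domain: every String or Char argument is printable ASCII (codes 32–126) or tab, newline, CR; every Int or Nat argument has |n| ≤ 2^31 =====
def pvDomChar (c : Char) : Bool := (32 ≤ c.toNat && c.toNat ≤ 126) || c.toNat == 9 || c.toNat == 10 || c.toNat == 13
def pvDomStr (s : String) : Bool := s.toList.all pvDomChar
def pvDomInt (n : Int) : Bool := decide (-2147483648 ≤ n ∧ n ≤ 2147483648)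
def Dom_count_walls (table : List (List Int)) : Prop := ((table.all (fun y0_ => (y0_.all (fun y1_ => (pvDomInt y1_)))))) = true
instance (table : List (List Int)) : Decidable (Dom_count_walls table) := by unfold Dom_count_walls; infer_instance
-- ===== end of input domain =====

-- B counts boundaries by a pass over horizontal adjacent pairs and a pass over vertical
-- adjacent pairs instead of A's four-neighbor scan per wall cell (alternative decomposition).

-- table[i][j] (indices produced by the loops are always nonnegative; Pre_ keeps them in range)
def cwGet (table : List (List Int)) (i j : Int) : Int :=
  PySem.List.pyGetD (PySem.List.pyGetD table i []) j 0

-- ===== PORT A =====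
def count_walls (table : List (List Int)) : Int :=
  let n : Int := table.length
  let m : Int := (PySem.List.pyGetD table 0 []).length  -- table[0]; Pre_ excludes the empty table (IndexError)
  (PySem.List.pyRange 0 n 1).foldl (fun counter i =>
    (PySem.List.pyRange 0 m 1).foldl (fun counter j =>
      if cwGet table i j = 1 then
        let counter := if 0 < j ∧ cwGet table i (j - 1) = 0 then counter + 1 else counter
        let counter := if j < m - 1 ∧ cwGet table i (j + 1) = 0 then counter + 1 else counter
        let counter := if i < n - 1 ∧ cwGet table (i + 1) j = 0 then counter + 1 else counter
        let counter := if 0 < i ∧ cwGet table (i - 1) j = 0 then counter + 1 else counter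
        counter
      else counter) counter) 0

-- ===== PORT B =====
-- (a == 1 and b == 0) or (a == 0 and b == 1)
def cwBoundary (a b : Int) : Bool := (a == 1 && b == 0) || (a == 0 && b == 1)

def count_walls_alt (table : List (List Int)) : Int :=
  let n : Int := table.length
  let m : Int := (PySem.List.pyGetD table 0 []).length  -- table[0]; Pre_ excludes the empty table (IndexError)
  let counter : Int :=
    (PySem.List.pyRange 0 n 1).foldl (fun c i =>
      (PySem.List.pyRange 0 (m - 1) 1).foldl (fun c j =>
        if cwBoundary (cwGet table i j) (cwGet table i (j + 1)) then c + 1 else c) c) 0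
  (PySem.List.pyRange 0 (n - 1) 1).foldl (fun c i =>
    (PySem.List.pyRange 0 m 1).foldl (fun c j =>
      if cwBoundary (cwGet table i j) (cwGet table (i + 1) j) then c + 1 else c) c) counter

-- ===== PRECONDITION & SPEC =====
-- A raises IndexError on the empty table (table[0]) and when some row is shorter than
-- len(table[0]) (the inner loop indexes every row at every j < m); Pre_ excludes exactly those.
def Pre_count_walls (table : List (List Int)) : Prop :=
  table ≠ [] ∧ ∀ row ∈ table, (PySem.List.pyGetD table 0 []).length ≤ row.length
instance (table : List (List Int)) : Decidable (Pre_count_walls table) := by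
  unfold Pre_count_walls; infer_instance

def pvWitness_count_walls : List (List Int) := [[1, 0, 1], [0, 1, 0]]

def Spec_count_walls (table : List (List Int)) (out : Int) : Prop := out = count_walls_alt table
instance (table : List (List Int)) (out : Int) : Decidable (Spec_count_walls table out) := by
  unfold Spec_count_walls; infer_instance

-- ===== CLAIM (what is proved, stated in full; the proofs are below) =====
def Claim_equal_count_walls : Prop := ∀ (table : List (List Int)), Dom_count_walls table → Pre_count_walls table → Spec_count_walls table (count_walls table)

-- ===== LEMMAS AND PROOFS =====

-- horizontal per-cell contribution of A at (i, j)
def wH (t : List (List Int)) (m i j : Int) : Int :=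
  (if cwGet t i j = 1 ∧ 0 < j ∧ cwGet t i (j - 1) = 0 then 1 else 0)
  + (if cwGet t i j = 1 ∧ j < m - 1 ∧ cwGet t i (j + 1) = 0 then 1 else 0)

-- vertical per-cell contribution of A at (i, j)
def wV (t : List (List Int)) (n i j : Int) : Int :=
  (if cwGet t i j = 1 ∧ i < n - 1 ∧ cwGet t (i + 1) j = 0 then 1 else 0)
  + (if cwGet t i j = 1 ∧ 0 < i ∧ cwGet t (i - 1) j = 0 then 1 else 0)

lemma foldl_body_add (f : Int → Int) (g : Int → Int → Int)
    (h : ∀ c x, g c x = c + f x) :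
    ∀ (l : List Int) (c : Int), l.foldl g c = c + (l.map f).sum := by
  intro l
  induction l with
  | nil => intro c; simp
  | cons x xs ih =>
    intro c
    simp only [List.foldl_cons, List.map_cons, List.sum_cons, ih, h]
    ring

lemma sum_map_pyRange (k : Int) (f : Int → Int) :
    ((PySem.List.pyRange 0 k 1).map f).sum = ∑ a ∈ Finset.range k.toNat, f a := by
  rw [PySem.List.pyRange_one]
  have hk : k - 0 = k := by ring
  rw [hk]
  generalize k.toNat = N
  induction N with
  | zero => simp
  | succ K ih =>
    rw [List.range_succ, Finset.sum_range_succ, ← ih]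
    simp

lemma bodyA_eq (t : List (List Int)) (n m i c j : Int) :
    (if cwGet t i j = 1 then
        let c := if 0 < j ∧ cwGet t i (j - 1) = 0 then c + 1 else c
        let c := if j < m - 1 ∧ cwGet t i (j + 1) = 0 then c + 1 else c
        let c := if i < n - 1 ∧ cwGet t (i + 1) j = 0 then c + 1 else c
        let c := if 0 < i ∧ cwGet t (i - 1) j = 0 then c + 1 else c
        c
      else c) = c + (wH t m i j + wV t n i j) := by
  simp only [wH, wV]
  split_ifs <;> omega

lemma pair_count (F : Int → Int) (M : ℕ) :
    (∑ j ∈ Finset.range M,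
        ((if F j = 1 ∧ 0 < (j : Int) ∧ F ((j : Int) - 1) = 0 then (1 : Int) else 0)
          + (if F j = 1 ∧ (j : Int) < (M : Int) - 1 ∧ F ((j : Int) + 1) = 0 then 1 else 0)))
    = ∑ j ∈ Finset.range (M - 1),
        (if (F j = 1 ∧ F ((j : Int) + 1) = 0) ∨ (F j = 0 ∧ F ((j : Int) + 1) = 1) then 1 else 0) := by
  cases M with
  | zero => simp
  | succ K =>
    rw [Finset.sum_add_distrib, Finset.sum_range_succ' _ K, Finset.sum_range_succ, Nat.succ_sub_one]
    simp only [Nat.cast_zero, Nat.cast_add, Nat.cast_one, add_sub_cancel_right, lt_self_iff_false,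
      false_and, and_false, if_false, add_zero]
    rw [← Finset.sum_add_distrib]
    refine Finset.sum_congr rfl ?_
    intro j hj
    rw [Finset.mem_range] at hj
    split_ifs <;> omega

lemma foldl2_count (R1 R2 : List Int) (p : Int → Int → Bool) (c : Int) :
    R1.foldl (fun c i => R2.foldl (fun c j => if p i j then c + 1 else c) c) c
      = c + (R1.map (fun i => (R2.map (fun j => if p i j then (1 : Int) else 0)).sum)).sum := by
  apply foldl_body_add
  intro c' i
  apply foldl_body_add
  intro c'' j
  cases p i j <;> simp

lemma count_walls_eq_sum (t : List (List Int)) :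
    count_walls t
      = ∑ i ∈ Finset.range t.length, ∑ j ∈ Finset.range (PySem.List.pyGetD t 0 []).length,
          (wH t ((PySem.List.pyGetD t 0 []).length : Int) i j
            + wV t (t.length : Int) i j) := by
  have h : count_walls t
      = 0 + ((PySem.List.pyRange 0 (t.length : Int) 1).map
          (fun i => ((PySem.List.pyRange 0 ((PySem.List.pyGetD t 0 []).length : Int) 1).map
            (fun j => wH t ((PySem.List.pyGetD t 0 []).length : Int) i j
              + wV t (t.length : Int) i j)).sum)).sum := by
    apply foldl_body_add
    intro c i
    apply foldl_body_add
    intro c' j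
    exact bodyA_eq t _ _ i c' j
  rw [h, zero_add, sum_map_pyRange, Int.toNat_natCast]
  refine Finset.sum_congr rfl ?_
  intro i _
  rw [sum_map_pyRange, Int.toNat_natCast]

lemma count_walls_alt_eq_sum (t : List (List Int)) :
    count_walls_alt t
      = (∑ i ∈ Finset.range t.length,
          ∑ j ∈ Finset.range ((PySem.List.pyGetD t 0 []).length - 1),
            (if cwBoundary (cwGet t i j) (cwGet t i ((j : Int) + 1)) then (1 : Int) else 0))
        + ∑ i ∈ Finset.range (t.length - 1),
            ∑ j ∈ Finset.range (PySem.List.pyGetD t 0 []).length,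
              (if cwBoundary (cwGet t i j) (cwGet t ((i : Int) + 1) j) then (1 : Int) else 0) := by
  simp only [count_walls_alt]
  rw [foldl2_count, foldl2_count, zero_add]
  simp only [sum_map_pyRange, Int.toNat_natCast]
  have hMt : (((PySem.List.pyGetD t 0 []).length : Int) - 1).toNat
      = (PySem.List.pyGetD t 0 []).length - 1 := by omega
  have hNt : ((t.length : Int) - 1).toNat = t.length - 1 := by omega
  rw [hMt, hNt]

lemma horiz_sum (t : List (List Int)) (i : Int) (M : ℕ) :
    ∑ j ∈ Finset.range M, wH t (M : Int) i j
      = ∑ j ∈ Finset.range (M - 1),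
          (if cwBoundary (cwGet t i j) (cwGet t i ((j : Int) + 1)) then (1 : Int) else 0) := by
  calc ∑ j ∈ Finset.range M, wH t (M : Int) i j
      = ∑ j ∈ Finset.range M,
          ((if cwGet t i j = 1 ∧ 0 < (j : Int) ∧ cwGet t i ((j : Int) - 1) = 0 then (1 : Int) else 0)
            + (if cwGet t i j = 1 ∧ (j : Int) < (M : Int) - 1 ∧ cwGet t i ((j : Int) + 1) = 0 then 1 else 0)) := by
        simp only [wH]
    _ = ∑ j ∈ Finset.range (M - 1),
          (if (cwGet t i j = 1 ∧ cwGet t i ((j : Int) + 1) = 0)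
            ∨ (cwGet t i j = 0 ∧ cwGet t i ((j : Int) + 1) = 1) then (1 : Int) else 0) :=
        pair_count (cwGet t i) M
    _ = ∑ j ∈ Finset.range (M - 1),
          (if cwBoundary (cwGet t i j) (cwGet t i ((j : Int) + 1)) then (1 : Int) else 0) := by
        refine Finset.sum_congr rfl ?_
        intro j _
        simp [cwBoundary]

lemma vert_sum (t : List (List Int)) (j : Int) (N : ℕ) :
    ∑ i ∈ Finset.range N, wV t (N : Int) i j
      = ∑ i ∈ Finset.range (N - 1),
          (if cwBoundary (cwGet t i j) (cwGet t ((i : Int) + 1) j) then (1 : Int) else 0) := by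
  calc ∑ i ∈ Finset.range N, wV t (N : Int) i j
      = ∑ i ∈ Finset.range N,
          ((if cwGet t i j = 1 ∧ 0 < (i : Int) ∧ cwGet t ((i : Int) - 1) j = 0 then (1 : Int) else 0)
            + (if cwGet t i j = 1 ∧ (i : Int) < (N : Int) - 1 ∧ cwGet t ((i : Int) + 1) j = 0 then 1 else 0)) := by
        refine Finset.sum_congr rfl ?_
        intro i _
        simp only [wV]
        exact add_comm _ _
    _ = ∑ i ∈ Finset.range (N - 1),
          (if (cwGet t i j = 1 ∧ cwGet t ((i : Int) + 1) j = 0)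
            ∨ (cwGet t i j = 0 ∧ cwGet t ((i : Int) + 1) j = 1) then (1 : Int) else 0) :=
        pair_count (fun k => cwGet t k j) N
    _ = ∑ i ∈ Finset.range (N - 1),
          (if cwBoundary (cwGet t i j) (cwGet t ((i : Int) + 1) j) then (1 : Int) else 0) := by
        refine Finset.sum_congr rfl ?_
        intro i _
        simp [cwBoundary]

lemma count_walls_eq (t : List (List Int)) : count_walls t = count_walls_alt t := by
  rw [count_walls_eq_sum, count_walls_alt_eq_sum]
  have split : ∑ i ∈ Finset.range t.length, ∑ j ∈ Finset.range (PySem.List.pyGetD t 0 []).length,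
        (wH t ((PySem.List.pyGetD t 0 []).length : Int) i j + wV t (t.length : Int) i j)
      = (∑ i ∈ Finset.range t.length, ∑ j ∈ Finset.range (PySem.List.pyGetD t 0 []).length,
          wH t ((PySem.List.pyGetD t 0 []).length : Int) i j)
        + (∑ i ∈ Finset.range t.length, ∑ j ∈ Finset.range (PySem.List.pyGetD t 0 []).length,
          wV t (t.length : Int) i j) := by
    rw [← Finset.sum_add_distrib]
    exact Finset.sum_congr rfl (fun i _ => Finset.sum_add_distrib)
  rw [split]
  congr 1
  · exact Finset.sum_congr rfl (fun i _ => horiz_sum t i (PySem.List.pyGetD t 0 []).length)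
  · calc ∑ i ∈ Finset.range t.length, ∑ j ∈ Finset.range (PySem.List.pyGetD t 0 []).length,
          wV t (t.length : Int) i j
        = ∑ j ∈ Finset.range (PySem.List.pyGetD t 0 []).length, ∑ i ∈ Finset.range t.length,
            wV t (t.length : Int) i j := Finset.sum_comm
      _ = ∑ j ∈ Finset.range (PySem.List.pyGetD t 0 []).length, ∑ i ∈ Finset.range (t.length - 1),
            (if cwBoundary (cwGet t i j) (cwGet t ((i : Int) + 1) j) then (1 : Int) else 0) :=
          Finset.sum_congr rfl (fun j _ => vert_sum t j t.length)
      _ = ∑ i ∈ Finset.range (t.length - 1), ∑ j ∈ Finset.range (PySem.List.pyGetD t 0 []).length,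
            (if cwBoundary (cwGet t i j) (cwGet t ((i : Int) + 1) j) then (1 : Int) else 0) :=
          Finset.sum_comm

-- ===== VERDICT (by name: the statement is the Claim_ definition above) =====
theorem count_walls_spec : Claim_equal_count_walls := by
  intro t _ _
  exact count_walls_eq t
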